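-- pv_equiv track=rewrite | github.com/JasonSong97/codingtest | 프로그래머스/2/87946. 피로도/피로도.py | solution
-- ===== SOURCE A (Python) =====
-- from itertools import permutations
--
-- def solution(pirodo, dungeons):
--     answer = -1
--
--     newDungeons = []
--     for i in range(len(dungeons)):
--         if dungeons[i][0] > pirodo:
--             continue
--         else:
--             newDungeons.append(dungeons[i])
--
--     answerList = []
--     for d in permutations(newDungeons):
--         visitCount = 0
--         tempPirodo = pirodo
--         for idx in range(len(d)):
--             if tempPirodo >= d[idx][0]:
--                 tempPirodo -= d[idx][1]
--                 visitCount += 1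
--             else:
--                 continue
--         answerList.append(visitCount)
--     return max(answerList)
-- ===== SOURCE B (Python) =====
-- def solution(pirodo, dungeons):
--     ds = [d for d in dungeons if d[0] <= pirodo]
--     return _go(pirodo, [], ds)
--
-- def _go(p, pre, rest):
--     # best number of dungeons clearable: try each element of `rest` as the next
--     # dungeon (pre = elements already skipped at this level), recurse on the rest.
--     if not rest:
--         return 0
--     x, r = rest[0], rest[1:]
--     m = _go(p, pre + [x], r)
--     if p >= x[0]:
--         v = 1 + _go(p - x[1], [], pre + r)
--         if v > m:
--             m = v
--     return m
-- ===== Notes on version B (the rewrite author's own statement) =====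
-- stated objective: faster
-- what changed: A enumerates all n! permutations of the eligible dungeons and greedily scans each; B runs a pruned depth-first search that only ever extends feasible clear-sequences (choose a next affordable dungeon or skip it), so infeasible orderings are never generated.
import Mathlib
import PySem

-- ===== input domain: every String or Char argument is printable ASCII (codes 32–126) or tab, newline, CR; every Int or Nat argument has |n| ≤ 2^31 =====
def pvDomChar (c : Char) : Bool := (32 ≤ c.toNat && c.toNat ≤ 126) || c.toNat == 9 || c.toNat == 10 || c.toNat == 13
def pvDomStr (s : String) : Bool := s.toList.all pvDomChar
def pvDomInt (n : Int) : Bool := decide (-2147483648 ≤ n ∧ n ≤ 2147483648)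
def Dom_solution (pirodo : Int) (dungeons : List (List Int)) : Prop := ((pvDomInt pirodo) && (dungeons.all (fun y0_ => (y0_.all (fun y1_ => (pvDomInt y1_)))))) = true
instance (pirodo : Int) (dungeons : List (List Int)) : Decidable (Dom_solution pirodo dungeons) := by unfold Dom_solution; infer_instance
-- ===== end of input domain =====

-- B replaces A's exhaustive scan of all n! permutations by a pruned DFS that only
-- extends feasible clear-sequences (objective: faster).

-- d[0] / d[1] of a dungeon row; `getD 0` is only reached outside Pre_solution
def pvReq (d : List Int) : Int := (PySem.List.pyGet? d 0).getD 0
def pvCost (d : List Int) : Int := (PySem.List.pyGet? d 1).getD 0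

-- ===== PORT A =====
def solution (pirodo : Int) (dungeons : List (List Int)) : Int :=
  let newDungeons := dungeons.foldl (fun acc d => if pvReq d > pirodo then acc else acc ++ [d]) []
  let answerList := (PySem.List.permutations newDungeons newDungeons.length).map
      (fun d => (d.foldl (fun (st : Int × Int) x =>
          if st.2 ≥ pvReq x then (st.1 + 1, st.2 - pvCost x) else st) ((0 : Int), pirodo)).1)
  (PySem.List.max? answerList (fun x => x)).getD (-1)

-- ===== PORT B =====
-- port of Source B's `_go`: try each element of `rest` as the next dungeon, `pre` = skipped so far
def goB (p : Int) (pre rest : List (List Int)) : Int :=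
  match rest with
  | [] => 0
  | x :: r =>
    let m := goB p (pre ++ [x]) r
    if p ≥ pvReq x then
      let v := 1 + goB (p - pvCost x) [] (pre ++ r)
      if v > m then v else m
    else m
termination_by (pre.length + rest.length, rest.length)
decreasing_by
  · simp [Prod.lex_iff]; omega
  · simp [Prod.lex_iff]

def solution_alt (pirodo : Int) (dungeons : List (List Int)) : Int :=
  goB pirodo [] (dungeons.filter (fun d => pvReq d ≤ pirodo))

-- ===== PRECONDITION & SPEC =====
-- Pre_ excludes exactly the inputs on which Python A raises IndexError: an empty
-- dungeon row, or a one-element row whose entry is ≤ pirodo (its cost d[1] is read).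
def Pre_solution (pirodo : Int) (dungeons : List (List Int)) : Prop :=
  ∀ d ∈ dungeons, d ≠ [] ∧ (d.length = 1 → pirodo < d.headI)
instance (pirodo : Int) (dungeons : List (List Int)) : Decidable (Pre_solution pirodo dungeons) := by
  unfold Pre_solution; infer_instance

def pvWitness_solution : Int × List (List Int) := (80, [[80, 20], [50, 40], [30, 10]])

def Spec_solution (pirodo : Int) (dungeons : List (List Int)) (out : Int) : Prop := out = solution_alt pirodo dungeons
instance (pirodo : Int) (dungeons : List (List Int)) (out : Int) : Decidable (Spec_solution pirodo dungeons out) := by unfold Spec_solution; infer_instance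

-- ===== CLAIM (what is proved, stated in full; the proofs are below) =====
def Claim_equal_solution : Prop := ∀ (pirodo : Int) (dungeons : List (List Int)), Dom_solution pirodo dungeons → Pre_solution pirodo dungeons → Spec_solution pirodo dungeons (solution pirodo dungeons)

-- ===== LEMMAS AND PROOFS =====

-- A's inner greedy loop, count component, as a structural recursion
def gA : Int → List (List Int) → Int
  | _, [] => 0
  | p, x :: r => if p ≥ pvReq x then 1 + gA (p - pvCost x) r else gA p r

-- the optimum as a clean specification: max over the choice of first dungeon
def specM (p : Int) (l : List (List Int)) : Int :=
  (l.attach.map (fun x =>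
    if pvReq x.1 ≤ p then 1 + specM (p - pvCost x.1) (l.erase x.1) else 0)).foldr max 0
termination_by l.length
decreasing_by
  have := List.length_erase_of_mem x.2
  have : l.length ≠ 0 := by
    intro h; rw [List.length_eq_zero_iff] at h; subst h; cases x.2
  omega

lemma foldr_max_nonneg (L : List Int) : 0 ≤ L.foldr max 0 := by
  induction L with
  | nil => simp
  | cons a t ih =>
    simp only [List.foldr_cons]
    exact le_trans ih (le_max_right _ _)

lemma le_foldr_max {L : List Int} {a : Int} (h : a ∈ L) : a ≤ L.foldr max 0 := by
  induction L with
  | nil => cases h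
  | cons b t ih =>
    simp only [List.foldr_cons]
    rcases List.mem_cons.mp h with rfl | h
    · exact le_max_left _ _
    · exact le_trans (ih h) (le_max_right _ _)

lemma foldr_max_le {L : List Int} {M : Int} (h0 : 0 ≤ M) (h : ∀ a ∈ L, a ≤ M) :
    L.foldr max 0 ≤ M := by
  induction L with
  | nil => simpa
  | cons b t ih =>
    simp only [List.foldr_cons]
    exact max_le (h b (by simp)) (ih (fun a ha => h a (by simp [ha])))

lemma foldr_max_eq_zero_or_mem (L : List Int) : L.foldr max 0 = 0 ∨ L.foldr max 0 ∈ L := by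
  induction L with
  | nil => left; rfl
  | cons b t ih =>
    simp only [List.foldr_cons]
    rcases le_or_gt (t.foldr max 0) b with h | h
    · right; exact List.mem_cons.mpr (Or.inl (max_eq_left h))
    · rw [max_eq_right (le_of_lt h)]
      rcases ih with h0 | hm
      · left; exact h0
      · right; exact List.mem_cons.mpr (Or.inr hm)

lemma specM_eq_map (p : Int) (l : List (List Int)) :
    specM p l = (l.map (fun x =>
      if pvReq x ≤ p then 1 + specM (p - pvCost x) (l.erase x) else 0)).foldr max 0 := by
  rw [specM]
  congr 1
  simp

lemma specM_nonneg (p : Int) (l : List (List Int)) : 0 ≤ specM p l := by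
  rw [specM_eq_map]; exact foldr_max_nonneg _

lemma specM_nil (p : Int) : specM p [] = 0 := by rw [specM_eq_map]; rfl

-- permutation invariance of specM
lemma specM_perm : ∀ (n : Nat) (p : Int) (l l' : List (List Int)),
    l.length ≤ n → l.Perm l' → specM p l = specM p l' := by
  intro n
  induction n with
  | zero =>
    intro p l l' hn hp
    have : l = [] := List.length_eq_zero_iff.mp (Nat.le_zero.mp hn)
    subst this
    have : l' = [] := hp.nil_eq.symm
    subst this; rfl
  | succ n ih =>
    intro p l l' hn hp
    rw [specM_eq_map, specM_eq_map]
    have hmap : l.map (fun x => if pvReq x ≤ p then 1 + specM (p - pvCost x) (l.erase x) else 0)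
        = l.map (fun x => if pvReq x ≤ p then 1 + specM (p - pvCost x) (l'.erase x) else 0) := by
      apply List.map_congr_left
      intro x hx
      have hlen : (l.erase x).length ≤ n := by
        have := List.length_erase_of_mem hx
        have : (l.erase x).length = l.length - 1 := this
        omega
      rw [ih (p - pvCost x) (l.erase x) (l'.erase x) hlen (hp.erase x)]
    rw [hmap]
    have hperm : (l.map (fun x => if pvReq x ≤ p then 1 + specM (p - pvCost x) (l'.erase x) else 0)).Perm
        (l'.map (fun x => if pvReq x ≤ p then 1 + specM (p - pvCost x) (l'.erase x) else 0)) :=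
      hp.map _
    exact le_antisymm
      (foldr_max_le (foldr_max_nonneg _) (fun a ha => le_foldr_max (hperm.mem_iff.mp ha)))
      (foldr_max_le (foldr_max_nonneg _) (fun a ha => le_foldr_max (hperm.mem_iff.mpr ha)))

lemma specM_choice {p : Int} {l : List (List Int)} {x : List Int}
    (hx : x ∈ l) (hf : pvReq x ≤ p) :
    1 + specM (p - pvCost x) (l.erase x) ≤ specM p l := by
  rw [specM_eq_map p l]
  apply le_foldr_max
  refine List.mem_map.mpr ⟨x, hx, ?_⟩
  rw [if_pos hf]

lemma specM_erase_le : ∀ (n : Nat) (p : Int) (l : List (List Int)) (x : List Int),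
    l.length ≤ n → x ∈ l → specM p (l.erase x) ≤ specM p l := by
  intro n
  induction n with
  | zero =>
    intro p l x hn hx
    have : l = [] := List.length_eq_zero_iff.mp (Nat.le_zero.mp hn)
    subst this; cases hx
  | succ n ih =>
    intro p l x hn hx
    rw [specM_eq_map p (l.erase x)]
    apply foldr_max_le (specM_nonneg p l)
    intro a ha
    rcases List.mem_map.mp ha with ⟨y, hy, rfl⟩
    have hyl : y ∈ l := List.mem_of_mem_erase hy
    by_cases hf : pvReq y ≤ p
    · rw [if_pos hf]
      have hcomm : (l.erase x).erase y = (l.erase y).erase x := List.erase_comm x y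
      have hstep : specM (p - pvCost y) ((l.erase x).erase y) ≤ specM (p - pvCost y) (l.erase y) := by
        rw [hcomm]
        by_cases hxe : x ∈ l.erase y
        · apply ih
          · have := List.length_erase_of_mem hyl; omega
          · exact hxe
        · rw [List.erase_of_not_mem hxe]
      have := specM_choice hyl hf
      omega
    · rw [if_neg hf]; exact specM_nonneg p l

lemma gA_nonneg : ∀ (l : List (List Int)) (p : Int), 0 ≤ gA p l := by
  intro l
  induction l with
  | nil => intro p; simp [gA]
  | cons x r ih =>
    intro p
    simp only [gA]
    split
    · have := ih (p - pvCost x); omega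
    · exact ih p

-- A's inner loop computes gA
lemma gA_foldl (l : List (List Int)) : ∀ (c p : Int),
    (l.foldl (fun (st : Int × Int) x =>
      if st.2 ≥ pvReq x then (st.1 + 1, st.2 - pvCost x) else st) (c, p)).1 = c + gA p l := by
  induction l with
  | nil => intro c p; simp [gA]
  | cons x r ih =>
    intro c p
    simp only [List.foldl, gA]
    by_cases h : p ≥ pvReq x
    · rw [if_pos h, if_pos h, ih]; ring
    · rw [if_neg h, if_neg h, ih]

-- upper bound: any greedy scan of a permutation of l is at most specM p l
lemma gA_le_specM : ∀ (π : List (List Int)) (p : Int) (l : List (List Int)),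
    π.Perm l → gA p π ≤ specM p l := by
  intro π
  induction π with
  | nil =>
    intro p l hp
    have : l = [] := hp.nil_eq.symm
    subst this; simp [gA, specM_nil]
  | cons x xs ih =>
    intro p l hp
    have hxl : x ∈ l := hp.subset (List.mem_cons_self)
    have hxs : xs.Perm (l.erase x) :=
      (hp.trans (List.perm_cons_erase hxl)).cons_inv
    simp only [gA]
    by_cases hf : p ≥ pvReq x
    · rw [if_pos hf]
      have h1 := ih (p - pvCost x) (l.erase x) hxs
      have h2 := specM_choice hxl hf
      omega
    · rw [if_neg hf]
      have h1 := ih p (l.erase x) hxs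
      have h2 := specM_erase_le l.length p l x le_rfl hxl
      omega

-- lower bound: some permutation of l greedily reaches specM p l
lemma specM_witness : ∀ (n : Nat) (p : Int) (l : List (List Int)), l.length ≤ n →
    ∃ π, π.Perm l ∧ specM p l ≤ gA p π := by
  intro n
  induction n with
  | zero =>
    intro p l hn
    have : l = [] := List.length_eq_zero_iff.mp (Nat.le_zero.mp hn)
    subst this
    exact ⟨[], List.Perm.refl _, by simp [gA, specM_nil]⟩
  | succ n ih =>
    intro p l hn
    rcases foldr_max_eq_zero_or_mem
        (l.map (fun x => if pvReq x ≤ p then 1 + specM (p - pvCost x) (l.erase x) else 0)) with h0 | hm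
    · refine ⟨l, List.Perm.refl _, ?_⟩
      rw [specM_eq_map, h0]; exact gA_nonneg l p
    · rcases List.mem_map.mp hm with ⟨x, hxl, hx⟩
      by_cases hf : pvReq x ≤ p
      · rw [if_pos hf] at hx
        have hlen : (l.erase x).length ≤ n := by
          have := List.length_erase_of_mem hxl
          have hl : l.length ≠ 0 := by
            intro h; rw [List.length_eq_zero_iff] at h; subst h; cases hxl
          omega
        rcases ih (p - pvCost x) (l.erase x) hlen with ⟨π', hπ', hg⟩
        refine ⟨x :: π', ?_, ?_⟩
        · exact (hπ'.cons x).trans (List.perm_cons_erase hxl).symm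
        · simp only [gA]
          rw [if_pos (by omega : p ≥ pvReq x)]
          rw [specM_eq_map, ← hx]
          omega
      · rw [if_neg hf] at hx
        refine ⟨l, List.Perm.refl _, ?_⟩
        rw [specM_eq_map, ← hx]
        exact gA_nonneg l p

-- ===== goB facts =====

lemma goB_nil (p : Int) (pre : List (List Int)) : goB p pre [] = 0 := by rw [goB]

lemma goB_cons (p : Int) (pre : List (List Int)) (x : List Int) (r : List (List Int)) :
    goB p pre (x :: r) =
      (if p ≥ pvReq x then
         (if 1 + goB (p - pvCost x) [] (pre ++ r) > goB p (pre ++ [x]) r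
          then 1 + goB (p - pvCost x) [] (pre ++ r)
          else goB p (pre ++ [x]) r)
       else goB p (pre ++ [x]) r) := by
  rw [goB]

lemma goB_nonneg : ∀ (rest pre : List (List Int)) (p : Int), 0 ≤ goB p pre rest := by
  intro rest
  induction rest with
  | nil => intro pre p; rw [goB_nil]
  | cons x r ih =>
    intro pre p
    rw [goB_cons]
    have := ih (pre ++ [x]) p
    split_ifs <;> omega

lemma goB_skip_le (p : Int) (pre : List (List Int)) (x : List Int) (r : List (List Int)) :
    goB p (pre ++ [x]) r ≤ goB p pre (x :: r) := by
  rw [goB_cons]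
  split_ifs <;> omega

-- taking a feasible x from `rest` is one of the candidates goB maximizes over
lemma goB_choice : ∀ (rest pre : List (List Int)) (x : List Int) (p : Int),
    x ∈ rest → pvReq x ≤ p →
    1 + goB (p - pvCost x) [] (pre ++ rest.erase x) ≤ goB p pre rest := by
  intro rest
  induction rest with
  | nil => intro pre x p hx; cases hx
  | cons y r ih =>
    intro pre x p hx hf
    by_cases hxy : y = x
    · subst hxy
      rw [List.erase_cons_head, goB_cons]
      rw [if_pos (by omega : p ≥ pvReq y)]
      split_ifs <;> omega
    · have hxr : x ∈ r := by
        rcases List.mem_cons.mp hx with rfl | h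
        · exact absurd rfl hxy
        · exact h
      have herase : (y :: r).erase x = y :: r.erase x :=
        List.erase_cons_tail (by simp [hxy])
      rw [herase]
      have hassoc : pre ++ y :: r.erase x = (pre ++ [y]) ++ r.erase x := by simp
      rw [hassoc]
      calc 1 + goB (p - pvCost x) [] ((pre ++ [y]) ++ r.erase x)
          ≤ goB p (pre ++ [y]) r := ih (pre ++ [y]) x p hxr hf
        _ ≤ goB p pre (y :: r) := goB_skip_le p pre y r

lemma goB_le_specM : ∀ (n : Nat) (rest pre : List (List Int)) (p : Int),
    pre.length + rest.length ≤ n → goB p pre rest ≤ specM p (pre ++ rest) := by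
  intro n
  induction n with
  | zero =>
    intro rest pre p hn
    have hr : rest = [] := List.length_eq_zero_iff.mp (by omega)
    subst hr
    rw [goB_nil]; exact specM_nonneg _ _
  | succ n ih =>
    intro rest
    induction rest with
    | nil =>
      intro pre p hn
      rw [goB_nil]; exact specM_nonneg _ _
    | cons x r ihr =>
      intro pre p hn
      rw [goB_cons]
      have hm : goB p (pre ++ [x]) r ≤ specM p (pre ++ x :: r) := by
        have := ihr (pre ++ [x]) p
          (by simp only [List.length_append, List.length_cons, List.length_nil] at hn ⊢; omega)
        simpa using this
      by_cases hf : p ≥ pvReq x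
      · rw [if_pos hf]
        have hv : 1 + goB (p - pvCost x) [] (pre ++ r) ≤ specM p (pre ++ x :: r) := by
          have h1 : goB (p - pvCost x) [] (pre ++ r) ≤ specM (p - pvCost x) (pre ++ r) := by
            have := ih (pre ++ r) [] (p - pvCost x) (by simp at hn ⊢; omega)
            simpa using this
          have hxmem : x ∈ pre ++ x :: r := by simp
          have h2 := specM_choice (p := p) hxmem (by omega)
          have hperm : ((pre ++ x :: r).erase x).Perm (pre ++ r) := by
            have h3 : (pre ++ x :: r).Perm (x :: (pre ++ r)) := List.perm_middle
            have h4 := h3.erase x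
            rwa [List.erase_cons_head] at h4
          have h5 : specM (p - pvCost x) ((pre ++ x :: r).erase x)
              = specM (p - pvCost x) (pre ++ r) :=
            specM_perm ((pre ++ x :: r).erase x).length _ _ _ le_rfl hperm
          omega
        split_ifs <;> omega
      · rw [if_neg hf]; exact hm

lemma specM_le_goB : ∀ (n : Nat) (p : Int) (l : List (List Int)),
    l.length ≤ n → specM p l ≤ goB p [] l := by
  intro n
  induction n with
  | zero =>
    intro p l hn
    have : l = [] := List.length_eq_zero_iff.mp (Nat.le_zero.mp hn)
    subst this; rw [specM_nil, goB_nil]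
  | succ n ih =>
    intro p l hn
    rcases foldr_max_eq_zero_or_mem
        (l.map (fun x => if pvReq x ≤ p then 1 + specM (p - pvCost x) (l.erase x) else 0)) with h0 | hm
    · rw [specM_eq_map, h0]; exact goB_nonneg l [] p
    · rcases List.mem_map.mp hm with ⟨x, hxl, hx⟩
      rw [specM_eq_map, ← hx]
      by_cases hf : pvReq x ≤ p
      · rw [if_pos hf]
        have hlen : (l.erase x).length ≤ n := by
          have := List.length_erase_of_mem hxl
          have hl : l.length ≠ 0 := by
            intro h; rw [List.length_eq_zero_iff] at h; subst h; cases hxl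
          omega
        have h1 := ih (p - pvCost x) (l.erase x) hlen
        have h2 := goB_choice l [] x p hxl hf
        simp only [List.nil_append] at h2
        omega
      · rw [if_neg hf]; exact goB_nonneg l [] p

-- ===== permutations facts =====

lemma mem_permutations_of_perm : ∀ (π xs : List (List Int)),
    π.Perm xs → π ∈ PySem.List.permutations xs xs.length := by
  intro π
  induction π with
  | nil =>
    intro xs hp
    have : xs = [] := hp.nil_eq.symm
    subst this
    simp [PySem.List.permutations_zero]
  | cons y p ih =>
    intro xs hp
    have hy : y ∈ xs := hp.subset (List.mem_cons_self)
    rcases List.append_of_mem hy with ⟨l₁, l₂, rfl⟩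
    have hlen : (l₁ ++ y :: l₂).length = (l₁.length + l₂.length) + 1 := by simp; omega
    rw [hlen, PySem.List.permutations]
    apply List.mem_flatMap.mpr
    refine ⟨l₁.length, ?_, ?_⟩
    · simp
    · have hget : (l₁ ++ y :: l₂)[l₁.length]? = some y := by
        rw [List.getElem?_append_right le_rfl]
        simp
      rw [hget]
      simp only []
      apply List.mem_map.mpr
      refine ⟨p, ?_, rfl⟩
      have herase : (l₁ ++ y :: l₂).eraseIdx l₁.length = l₁ ++ l₂ := by
        rw [List.eraseIdx_append_of_length_le le_rfl]
        simp
      rw [herase]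
      have hperm : p.Perm (l₁ ++ l₂) := by
        have h1 : (y :: p).Perm (y :: (l₁ ++ l₂)) := hp.trans List.perm_middle
        exact h1.cons_inv
      have := ih (l₁ ++ l₂) hperm
      simpa using this

-- A's filter loop
lemma filterA (pirodo : Int) : ∀ (l : List (List Int)) (acc : List (List Int)),
    l.foldl (fun acc d => if pvReq d > pirodo then acc else acc ++ [d]) acc
      = acc ++ l.filter (fun d => pvReq d ≤ pirodo) := by
  intro l
  induction l with
  | nil => intro acc; simp
  | cons d t ih =>
    intro acc
    simp only [List.foldl, List.filter]
    by_cases h : pvReq d > pirodo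
    · rw [if_pos h]
      have : (decide (pvReq d ≤ pirodo)) = false := by simp; omega
      rw [this, ih]
    · rw [if_neg h]
      have : (decide (pvReq d ≤ pirodo)) = true := by simp; omega
      rw [this, ih]
      simp

-- the central equality: both ports compute specM on the filtered list
lemma solution_eq_alt (pirodo : Int) (dungeons : List (List Int)) :
    solution pirodo dungeons = solution_alt pirodo dungeons := by
  unfold solution solution_alt
  rw [filterA]
  simp only [List.nil_append]
  set nd := dungeons.filter (fun d => pvReq d ≤ pirodo) with hnd
  have hmap : (PySem.List.permutations nd nd.length).map
      (fun d => (d.foldl (fun (st : Int × Int) x =>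
        if st.2 ≥ pvReq x then (st.1 + 1, st.2 - pvCost x) else st) ((0 : Int), pirodo)).1)
      = (PySem.List.permutations nd nd.length).map (fun d => gA pirodo d) := by
    apply List.map_congr_left
    intro d _
    rw [gA_foldl]; ring
  rw [hmap]
  -- the answer list is nonempty: nd itself is a permutation of nd
  have hnd_mem : nd ∈ PySem.List.permutations nd nd.length :=
    mem_permutations_of_perm nd nd (List.Perm.refl nd)
  have hne : (PySem.List.permutations nd nd.length).map (fun d => gA pirodo d) ≠ [] := by
    intro h
    rw [List.map_eq_nil_iff] at h
    rw [h] at hnd_mem; cases hnd_mem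
  rcases hmax : PySem.List.max? ((PySem.List.permutations nd nd.length).map (fun d => gA pirodo d))
      (fun x => x) with _ | m
  · exact absurd ((PySem.List.max?_eq_none_iff _ _).mp hmax) hne
  · simp only [Option.getD_some]
    have hmem := PySem.List.max?_mem hmax
    have hismax := PySem.List.max?_isMax hmax
    rcases List.mem_map.mp hmem with ⟨π, hπ, rfl⟩
    have hπperm : π.Perm nd := PySem.List.perm_of_mem_permutations hπ
    -- gA pirodo π ≤ specM ≤ goB and goB ≤ specM ≤ some list element ≤ gA pirodo π
    have h1 : gA pirodo π ≤ specM pirodo nd := gA_le_specM π pirodo nd hπperm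
    rcases specM_witness nd.length pirodo nd le_rfl with ⟨π₀, hπ₀, hg₀⟩
    have hπ₀mem : gA pirodo π₀ ∈ (PySem.List.permutations nd nd.length).map (fun d => gA pirodo d) :=
      List.mem_map.mpr ⟨π₀, mem_permutations_of_perm π₀ nd hπ₀, rfl⟩
    have h2 : gA pirodo π₀ ≤ gA pirodo π := hismax _ hπ₀mem
    have h3 : specM pirodo nd ≤ gA pirodo π := by omega
    have h4 : goB pirodo [] nd ≤ specM pirodo nd := by
      have := goB_le_specM nd.length nd [] pirodo (by simp)
      simpa using this
    have h5 : specM pirodo nd ≤ goB pirodo [] nd := specM_le_goB nd.length pirodo nd le_rfl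
    omega

-- ===== VERDICT (by name: the statement is the Claim_ definition above) =====
theorem solution_spec : Claim_equal_solution := by
  intro pirodo dungeons _ _
  unfold Spec_solution
  exact solution_eq_alt pirodo dungeons
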